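-- pv_equiv track=rewrite | github.com/Senar377/FKBotCheker | document_checker.py | exact_search_with_context
-- ===== SOURCE A (Python) =====
-- from typing import List, Dict, Any, Optional, Tuple
--
-- def exact_search_with_context(text: str, search_terms: List[str]) -> List[Tuple[int, int, str, str]]:
--     """Точный поиск с возвратом контекста"""
--     matches = []
--     text_lower = text.lower()
--
--     for term in search_terms:
--         if not term or len(term) < 2:
--             continue
--
--         term_lower = term.lower()
--         start = 0
--
--         while True:
--             pos = text_lower.find(term_lower, start)
--             if pos == -1:
--                 break
--
--             # Проверяем, что это целое слово (не часть другого слова)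
--             is_word_boundary = True
--             if pos > 0:
--                 prev_char = text[pos - 1]
--                 is_word_boundary = not (prev_char.isalnum() or prev_char in '_-')
--
--             if pos + len(term) < len(text):
--                 next_char = text[pos + len(term)]
--                 is_word_boundary = is_word_boundary and not (next_char.isalnum() or next_char in '_-')
--
--             if is_word_boundary:
--                 # Берем контекст вокруг найденного слова
--                 context_start = max(0, pos - 50)
--                 context_end = min(len(text), pos + len(term) + 50)
--                 context = text[context_start:context_end]
--
--                 matches.append((pos, pos + len(term), term, context))
--
--             start = pos + 1
--
--     return matches
-- ===== SOURCE B (Python) =====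
-- from typing import List, Tuple
--
--
-- def _is_word_boundary(text: str, pos: int, m: int) -> bool:
--     if pos > 0 and (text[pos - 1].isalnum() or text[pos - 1] in '_-'):
--         return False
--     if pos + m < len(text) and (text[pos + m].isalnum() or text[pos + m] in '_-'):
--         return False
--     return True
--
--
-- def _context(text: str, pos: int, m: int) -> str:
--     return text[max(0, pos - 50):min(len(text), pos + m + 50)]
--
--
-- def exact_search_with_context(text: str, search_terms: List[str]) -> List[Tuple[int, int, str, str]]:
--     text_lower = text.lower()
--     # one pass over the text: index every position by its (lowercased) character
--     index = {}
--     for i in range(len(text_lower)):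
--         index.setdefault(text_lower[i], []).append(i)
--     matches = []
--     for term in search_terms:
--         if len(term) < 2:
--             continue
--         term_lower = term.lower()
--         m = len(term)
--         for pos in index.get(term_lower[0], []):
--             if text_lower[pos:pos + m] == term_lower and _is_word_boundary(text, pos, m):
--                 matches.append((pos, pos + m, term, _context(text, pos, m)))
--     return matches
-- ===== Notes on version B (the rewrite author's own statement) =====
-- stated objective: alternative
-- what changed: A repeatedly rescans the text with str.find for every term; B builds a character-to-positions index of the text in one pass and, per term, tests only the indexed candidate positions of the term's first character with a slice comparison.
import Mathlib
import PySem

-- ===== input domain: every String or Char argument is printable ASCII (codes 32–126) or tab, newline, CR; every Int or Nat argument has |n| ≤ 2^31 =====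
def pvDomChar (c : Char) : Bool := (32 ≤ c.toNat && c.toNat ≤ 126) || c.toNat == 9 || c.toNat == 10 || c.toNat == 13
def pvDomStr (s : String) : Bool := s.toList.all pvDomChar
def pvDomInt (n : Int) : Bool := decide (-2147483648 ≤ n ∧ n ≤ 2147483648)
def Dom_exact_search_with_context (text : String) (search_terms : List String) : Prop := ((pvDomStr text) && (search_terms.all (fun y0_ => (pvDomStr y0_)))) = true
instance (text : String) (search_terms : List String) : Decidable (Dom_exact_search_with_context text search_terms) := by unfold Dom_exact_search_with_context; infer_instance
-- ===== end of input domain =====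

-- B replaces A's per-term repeated str.find scans by a character→positions index built in
-- one pass over the text; per term only the indexed candidate positions are tested (alternative
-- decomposition, same results in the same order).

-- ===== PORT A =====
-- Python's text_lower.find(term_lower, start) is PySem.Chars.findFrom; text[pos-1] / text[pos+m]
-- are read with pyGetD (the code only reads them at indices it has just checked to be in range).
-- The fuel argument only makes the 'while True' structural; it is never exhausted at the call site.
def pvA_loop (tc tl : List Char) (term : String) (pat : List Char) :
    (fuel : Nat) → (start : Nat) → List (Int × Int × String × String)
  | 0, _ => []
  | fuel + 1, start =>
    let pos := PySem.Chars.findFrom tl pat (start : Int) none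
    if pos = -1 then []
    else
      let p := pos.toNat
      let m := term.toList.length
      let wb1 : Bool :=
        if 0 < p then
          let prev := PySem.List.pyGetD tc ((p : Int) - 1) ' '
          !(PySem.Chars.isalnum prev || prev == '_' || prev == '-')
        else true
      let wb : Bool :=
        if p + m < tc.length then
          let nxt := PySem.List.pyGetD tc ((p : Int) + (m : Int)) ' '
          wb1 && !(PySem.Chars.isalnum nxt || nxt == '_' || nxt == '-')
        else wb1
      (if wb then
          let cs : Int := max 0 ((p : Int) - 50)
          let ce : Int := min (tc.length : Int) ((p : Int) + (m : Int) + 50)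
          [((p : Int), (p : Int) + (m : Int), term, String.ofList (PySem.List.slice tc (some cs) (some ce)))]
        else []) ++ pvA_loop tc tl term pat fuel (p + 1)

def exact_search_with_context (text : String) (search_terms : List String) : List (Int × Int × String × String) :=
  let tc := text.toList
  let tl := PySem.Chars.lower tc
  search_terms.foldl
    (fun acc term =>
      if term.toList.length < 2 then acc
      else acc ++ pvA_loop tc tl term (PySem.Chars.lower term.toList) (tc.length + 1) 0)
    []

-- ===== PORT B =====
def pvB_isWordBoundary (tc : List Char) (p : Int) (m : Nat) : Bool :=
  if 0 < p &&
      (let c := PySem.List.pyGetD tc (p - 1) ' '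
       PySem.Chars.isalnum c || c == '_' || c == '-') then false
  else if p + (m : Int) < (tc.length : Int) &&
      (let c := PySem.List.pyGetD tc (p + (m : Int)) ' '
       PySem.Chars.isalnum c || c == '_' || c == '-') then false
  else true

def pvB_context (tc : List Char) (p : Int) (m : Nat) : String :=
  String.ofList (PySem.List.slice tc (some (max 0 (p - 50))) (some (min (tc.length : Int) (p + (m : Int) + 50))))

def exact_search_with_context_alt (text : String) (search_terms : List String) : List (Int × Int × String × String) :=
  let tc := text.toList
  let tl := PySem.Chars.lower tc
  let index := (PySem.List.pyRange 0 (PySem.List.len tl) 1).foldl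
      (fun d j => d.modify (PySem.List.pyGetD tl j ' ') [] (· ++ [j])) (PySem.Dict.empty)
  search_terms.foldl
    (fun acc term =>
      if term.toList.length < 2 then acc
      else
        let pat := PySem.Chars.lower term.toList
        let m : Nat := term.toList.length
        (index.getD (PySem.List.pyGetD pat 0 ' ') []).foldl
          (fun ms p =>
            if PySem.List.slice tl (some p) (some (p + (m : Int))) == pat && pvB_isWordBoundary tc p m then
              ms ++ [(p, p + (m : Int), term, pvB_context tc p m)]
            else ms)
          acc)
    []

-- ===== PRECONDITION & SPEC =====
def Spec_exact_search_with_context (text : String) (search_terms : List String) (out : List (Int × Int × String × String)) : Prop := out = exact_search_with_context_alt text search_terms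
instance (text : String) (search_terms : List String) (out : List (Int × Int × String × String)) : Decidable (Spec_exact_search_with_context text search_terms out) := by unfold Spec_exact_search_with_context; infer_instance

-- ===== CLAIM (what is proved, stated in full; the proofs are below) =====
def Claim_equal_exact_search_with_context : Prop := ∀ (text : String) (search_terms : List String), Dom_exact_search_with_context text search_terms → Spec_exact_search_with_context text search_terms (exact_search_with_context text search_terms)

-- ===== LEMMAS AND PROOFS =====

-- the body of A's while-loop for one found position p (A's own let-chain, verbatim)
def pvStep (tc : List Char) (term : String) (p : Nat) : List (Int × Int × String × String) :=
  let m := term.toList.length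
  let wb1 : Bool :=
    if 0 < p then
      let prev := PySem.List.pyGetD tc ((p : Int) - 1) ' '
      !(PySem.Chars.isalnum prev || prev == '_' || prev == '-')
    else true
  let wb : Bool :=
    if p + m < tc.length then
      let nxt := PySem.List.pyGetD tc ((p : Int) + (m : Int)) ' '
      wb1 && !(PySem.Chars.isalnum nxt || nxt == '_' || nxt == '-')
    else wb1
  if wb then
    let cs : Int := max 0 ((p : Int) - 50)
    let ce : Int := min (tc.length : Int) ((p : Int) + (m : Int) + 50)
    [((p : Int), (p : Int) + (m : Int), term, String.ofList (PySem.List.slice tc (some cs) (some ce)))]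
  else []

-- "term_lower occurs in text_lower at position i"
def pvGood (tl pat : List Char) (i : Nat) : Bool := decide (pat <+: tl.drop i)

lemma pvLowerLen (cs : List Char) : (PySem.Chars.lower cs).length = cs.length := by
  simp [PySem.Chars.lower]

lemma pvNoPrefixFrom (tl pat : List Char) (s : Nat) (h : ¬ pat <:+: tl.drop s) :
    ∀ i, s ≤ i → ¬ pat <+: tl.drop i := by
  intro i hsi hpre
  apply h
  have hd : tl.drop i = (tl.drop s).drop (i - s) := by
    rw [List.drop_drop]; congr 1; omega
  rw [hd] at hpre
  exact hpre.isInfix.trans (List.drop_suffix _ _).isInfix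

lemma pvFilterNil (good : Nat → Bool) (n s : Nat) (h : ∀ i, s ≤ i → good i = false) :
    (List.range' s (n - s)).filter good = [] := by
  apply List.filter_eq_nil_iff.mpr
  intro i hi
  rw [List.mem_range'_1] at hi
  simp [h i hi.1]

lemma pvFilterSplit (good : Nat → Bool) (n s p : Nat) (hsp : s ≤ p) (hpn : p < n)
    (hgood : good p = true) (hmin : ∀ i, s ≤ i → i < p → good i = false) :
    (List.range' s (n - s)).filter good
      = p :: (List.range' (p + 1) (n - (p + 1))).filter good := by
  have h2 : s + (p - s) = p := by omega
  have h1 : n - s = (p - s) + (n - p) := by omega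
  rw [h1, ← List.range'_append_1, h2, List.filter_append]
  have hnil : (List.range' s (p - s)).filter good = [] := by
    apply List.filter_eq_nil_iff.mpr
    intro i hi
    rw [List.mem_range'_1] at hi
    simp [hmin i hi.1 (by omega)]
  have h3 : n - p = (n - (p + 1)) + 1 := by omega
  rw [hnil, List.nil_append, h3, List.range'_succ, List.filter_cons_of_pos hgood]

lemma pvA_loop_eq (tc tl : List Char) (term : String) (pat : List Char)
    (hpat : 1 ≤ pat.length) :
    ∀ fuel s, s ≤ tl.length → tl.length + 1 - s ≤ fuel →
      pvA_loop tc tl term pat fuel s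
        = ((List.range' s (tl.length - s)).filter (pvGood tl pat)).flatMap (pvStep tc term) := by
  intro fuel
  induction fuel with
  | zero => intro s hs hf; omega
  | succ fuel ih =>
    intro s hs hf
    by_cases hr : PySem.Chars.findFrom tl pat (s : Int) none = -1
    · rw [pvA_loop]
      rw [if_pos hr]
      have hno := (PySem.Chars.findFrom_natCast_eq_neg_one_iff tl pat s hs).mp hr
      rw [pvFilterNil (pvGood tl pat) tl.length s
        (fun i hi => by simp [pvGood, pvNoPrefixFrom tl pat s hno i hi])]
      simp
    · obtain ⟨hle, hpre, hmin⟩ := PySem.Chars.findFrom_natCast_spec tl pat s hs hr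
      set r := PySem.Chars.findFrom tl pat (s : Int) none with hrdef
      have hsp : s ≤ r.toNat := by omega
      have hplen : pat.length ≤ (tl.drop r.toNat).length := hpre.length_le
      have hpn : r.toNat < tl.length := by
        rw [List.length_drop] at hplen; omega
      rw [pvA_loop]
      rw [if_neg hr]
      show pvStep tc term r.toNat ++ pvA_loop tc tl term pat fuel (r.toNat + 1) = _
      rw [ih (r.toNat + 1) (by omega) (by omega)]
      rw [pvFilterSplit (pvGood tl pat) tl.length s r.toNat hsp hpn
        (by simp [pvGood, hpre]) (fun i h1 h2 => by simp [pvGood, hmin i h1 h2])]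
      rw [List.flatMap_cons]

lemma pvIndex_getD (tl : List Char) (c : Char) :
    ((PySem.List.pyRange 0 (PySem.List.len tl) 1).foldl
        (fun d j => d.modify (PySem.List.pyGetD tl j ' ') [] (· ++ [j]))
        (PySem.Dict.empty)).getD c []
      = ((List.range tl.length).filter (fun i => tl.getD i ' ' == c)).map (fun i : Nat => (i : Int)) := by
  rw [PySem.List.pyRange_one]
  simp only [PySem.List.len_eq, zero_add, Int.sub_zero, Int.toNat_natCast]
  rw [List.foldl_map]
  rw [← List.foldl_map (f := fun k : Nat => (PySem.List.pyGetD tl (k : Int) ' ', (k : Int)))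
        (g := fun (d : PySem.Dict Char (List Int)) p => d.modify p.1 [] (· ++ [p.2]))
        (l := List.range tl.length) (init := PySem.Dict.empty)]
  rw [PySem.Dict.getD_foldl_modify_append]
  rw [List.filter_map]
  simp only [Function.comp_def, PySem.List.pyGetD_natCast]
  simp only [List.map_map, Function.comp_def]
  simp

lemma pvStep_eq (tc : List Char) (term : String) (i : Nat) :
    pvStep tc term i
      = if pvB_isWordBoundary tc (i : Int) term.toList.length then
          [((i : Int), (i : Int) + (term.toList.length : Int), term,
            pvB_context tc (i : Int) term.toList.length)]
        else [] := by
  simp only [pvStep, pvB_isWordBoundary, pvB_context]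
  have h1' : ((0 : Int) < (i : Int)) = (0 < i) := by simp
  have h2' : ((i : Int) + (term.toList.length : Int) < ((tc.length : Int)))
      = (i + term.toList.length < tc.length) := propext (by exact_mod_cast Iff.rfl)
  simp only [h1', h2']
  by_cases h1 : 0 < i <;> by_cases h2 : i + term.toList.length < tc.length <;>
    cases hc1 : (PySem.Chars.isalnum (PySem.List.pyGetD tc ((i : Int) - 1) ' ')
        || PySem.List.pyGetD tc ((i : Int) - 1) ' ' == '_'
        || PySem.List.pyGetD tc ((i : Int) - 1) ' ' == '-') <;>
    cases hc2 : (PySem.Chars.isalnum (PySem.List.pyGetD tc ((i : Int) + (term.toList.length : Int)) ' ')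
        || PySem.List.pyGetD tc ((i : Int) + (term.toList.length : Int)) ' ' == '_'
        || PySem.List.pyGetD tc ((i : Int) + (term.toList.length : Int)) ' ' == '-') <;>
    simp [h1]

lemma pvGoodSlice (tl pat : List Char) (m : Nat) (hm : pat.length = m) (i : Nat) :
    (PySem.List.slice tl (some (i : Int)) (some ((i : Int) + (m : Int))) == pat)
      = pvGood tl pat i := by
  rw [PySem.List.slice_natCast_add, Bool.eq_iff_iff]
  simp only [pvGood, beq_iff_eq, decide_eq_true_eq]
  rw [List.prefix_iff_eq_take, hm, eq_comm]

lemma pvGoodKey (tl pat : List Char) (i : Nat) (hpat : pat ≠ [])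
    (h : pvGood tl pat i = true) :
    (tl.getD i ' ' == PySem.List.pyGetD pat 0 ' ') = true := by
  simp only [pvGood, decide_eq_true_eq] at h
  obtain ⟨t, ht⟩ := h
  cases pat with
  | nil => exact absurd rfl hpat
  | cons p0 rest =>
    have hdrop : tl.drop i = p0 :: (rest ++ t) := by rw [← ht]; simp
    have h0 : tl[i]? = some p0 := by
      have hg : (tl.drop i)[0]? = tl[i + 0]? := List.getElem?_drop
      rw [hdrop] at hg
      simpa using hg.symm
    simp [List.getD, h0, PySem.List.pyGetD_zero_cons]

lemma pvFlatMapFilter {α β : Type} (good bnd : α → Bool) (e : α → β) (l : List α) :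
    (l.filter good).flatMap (fun i => if bnd i then [e i] else [])
      = (l.filter (fun i => good i && bnd i)).map e := by
  induction l with
  | nil => rfl
  | cons a l ih =>
    by_cases hg : good a <;> by_cases hb : bnd a <;>
      simp [hg, hb, ih]

lemma pvTerm_eq (text term : String) (acc : List (Int × Int × String × String))
    (hlen : ¬ term.toList.length < 2) :
    acc ++ pvA_loop text.toList (PySem.Chars.lower text.toList) term
        (PySem.Chars.lower term.toList) (text.toList.length + 1) 0
      = (((PySem.List.pyRange 0 (PySem.List.len (PySem.Chars.lower text.toList)) 1).foldl
            (fun d j => d.modify (PySem.List.pyGetD (PySem.Chars.lower text.toList) j ' ') [] (· ++ [j]))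
            PySem.Dict.empty).getD
            (PySem.List.pyGetD (PySem.Chars.lower term.toList) 0 ' ') []).foldl
          (fun ms p =>
            if PySem.List.slice (PySem.Chars.lower text.toList) (some p)
                  (some (p + (term.toList.length : Int))) == PySem.Chars.lower term.toList
                && pvB_isWordBoundary text.toList p term.toList.length then
              ms ++ [(p, p + (term.toList.length : Int), term,
                pvB_context text.toList p term.toList.length)]
            else ms) acc := by
  set tc := text.toList with htc
  set tl := PySem.Chars.lower tc with htl
  set pat := PySem.Chars.lower term.toList with hpat
  have hplen : pat.length = term.toList.length := pvLowerLen _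
  have htlen : tl.length = tc.length := pvLowerLen _
  -- A side to filtered-range form
  rw [pvA_loop_eq tc tl term pat (by rw [hplen]; omega) (tc.length + 1) 0 (by omega) (by rw [htlen]; omega)]
  rw [Nat.sub_zero, ← List.range_eq_range']
  rw [show pvStep tc term = (fun i : Nat =>
        if pvB_isWordBoundary tc (i : Int) term.toList.length then
          [((i : Int), (i : Int) + (term.toList.length : Int), term,
            pvB_context tc (i : Int) term.toList.length)]
        else []) from funext (pvStep_eq tc term)]
  rw [pvFlatMapFilter]
  -- B side to filtered-range form
  rw [PySem.List.foldl_append_if]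
  rw [pvIndex_getD tl]
  rw [List.filter_map, List.map_map]
  rw [htlen]
  rw [List.filter_filter]
  have hne : pat ≠ [] := by
    intro h0
    have h00 : pat.length = 0 := by rw [h0]; rfl
    omega
  congr 1
  apply congrArg
  apply List.filter_congr
  intro i hi
  simp only [Function.comp_def]
  rw [pvGoodSlice tl pat term.toList.length hplen i]
  cases hgg : pvGood tl pat i
  · simp
  · have hk := pvGoodKey tl pat i hne hgg
    simp only [beq_iff_eq, List.getD] at hk
    simp [hk]

lemma pvFold (text : String) (terms : List String) : ∀ acc : List (Int × Int × String × String),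
    terms.foldl
      (fun acc term =>
        if term.toList.length < 2 then acc
        else acc ++ pvA_loop text.toList (PySem.Chars.lower text.toList) term
          (PySem.Chars.lower term.toList) (text.toList.length + 1) 0) acc
  = terms.foldl
      (fun acc term =>
        if term.toList.length < 2 then acc
        else
          (((PySem.List.pyRange 0 (PySem.List.len (PySem.Chars.lower text.toList)) 1).foldl
              (fun d j => d.modify (PySem.List.pyGetD (PySem.Chars.lower text.toList) j ' ') [] (· ++ [j]))
              PySem.Dict.empty).getD
              (PySem.List.pyGetD (PySem.Chars.lower term.toList) 0 ' ') []).foldl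
            (fun ms p =>
              if PySem.List.slice (PySem.Chars.lower text.toList) (some p)
                    (some (p + (term.toList.length : Int))) == PySem.Chars.lower term.toList
                  && pvB_isWordBoundary text.toList p term.toList.length then
                ms ++ [(p, p + (term.toList.length : Int), term,
                  pvB_context text.toList p term.toList.length)]
              else ms) acc) acc := by
  induction terms with
  | nil => intro acc; rfl
  | cons t ts ih =>
    intro acc
    by_cases h : t.toList.length < 2
    · simp only [List.foldl_cons, if_pos h]
      exact ih acc
    · simp only [List.foldl_cons, if_neg h]
      rw [pvTerm_eq text t acc h]
      exact ih _

-- ===== VERDICT (by name: the statement is the Claim_ definition above) =====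
theorem exact_search_with_context_spec : Claim_equal_exact_search_with_context := by
  intro text search_terms _
  unfold Spec_exact_search_with_context
  exact pvFold text search_terms []
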